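-- pv_equiv track=rewrite | github.com/CServinL/tbot | conductor/engines/creative_writing.py | _format_poetry
-- ===== SOURCE A (Python) =====
-- def _format_poetry(poem: str) -> str:
--     """Format poetry with proper line breaks and stanza structure.
--
--     Args:
--         poem: Raw poem text
--
--     Returns:
--         str: Formatted poem
--     """
--     lines = poem.split('\n')
--     formatted_lines = []
--
--     for line in lines:
--         # Clean up line
--         line = line.strip()
--         if line:
--             formatted_lines.append(line)
--         elif formatted_lines and formatted_lines[-1]:  # Empty line for stanza break
--             formatted_lines.append('')
--
--     return '\n'.join(formatted_lines)
-- ===== SOURCE B (Python) =====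
-- def _format_poetry(poem: str) -> str:
--     """Stanza-structured re-implementation: gather stripped lines into stanza
--     groups (runs of non-blank lines), then join stanzas with blank-line
--     separators, appending one trailing newline when the poem ends in blanks
--     after some content."""
--     stanzas = []
--     cur = []
--     for raw in poem.split('\n'):
--         line = raw.strip()
--         if line:
--             cur.append(line)
--         elif cur:
--             stanzas.append(cur)
--             cur = []
--     trailing = bool(stanzas) and not cur
--     if cur:
--         stanzas.append(cur)
--     return '\n\n'.join('\n'.join(s) for s in stanzas) + ('\n' if trailing else '')
-- ===== Notes on version B (the rewrite author's own statement) =====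
-- stated objective: alternative
-- what changed: A builds one flat list of output lines, deciding per blank input line whether to emit a stanza break by inspecting the last emitted line; B groups the stripped lines into stanza lists, joins the stanzas with blank-line separators and appends one trailing line break when the poem ends in blanks after content.
import Mathlib
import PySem

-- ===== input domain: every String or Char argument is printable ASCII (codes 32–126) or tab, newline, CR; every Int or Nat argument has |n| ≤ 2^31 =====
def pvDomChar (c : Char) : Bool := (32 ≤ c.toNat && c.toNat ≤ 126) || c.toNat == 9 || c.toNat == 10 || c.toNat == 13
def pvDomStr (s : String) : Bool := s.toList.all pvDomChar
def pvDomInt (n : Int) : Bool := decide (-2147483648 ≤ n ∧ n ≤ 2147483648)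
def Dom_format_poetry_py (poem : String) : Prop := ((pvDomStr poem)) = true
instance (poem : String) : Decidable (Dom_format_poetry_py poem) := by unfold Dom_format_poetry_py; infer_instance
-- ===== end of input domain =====

-- B replaces A's flat line list (with its look-at-the-last-line test per blank line) by
-- grouping the stripped lines into stanza lists joined with blank-line separators; same cost, different shape.

-- ===== PORT A =====
-- Ported on the List Char side of PySem (PySem.Str.* are thin wrappers over PySem.Chars.*, exact).
-- Python: `formatted_lines and formatted_lines[-1]` — [-1] on the (then nonempty) list is getLastD.
def pvAStep (acc : List (List Char)) (raw : List Char) : List (List Char) :=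
  let line := PySem.Chars.strip raw
  if line ≠ [] then acc ++ [line]
  else if acc ≠ [] ∧ acc.getLastD [] ≠ [] then acc ++ [[]]
  else acc

def format_poetry_py (poem : String) : String :=
  let lines := PySem.Chars.splitOn poem.toList ['\n']
  String.ofList (PySem.Chars.join ['\n'] (lines.foldl pvAStep []))

-- ===== PORT B =====
-- State = (finished stanzas, current stanza); mirrors Source B's (stanzas, cur).
def pvBStep (st : List (List (List Char)) × List (List Char)) (raw : List Char) :
    List (List (List Char)) × List (List Char) :=
  let line := PySem.Chars.strip raw
  if line ≠ [] then (st.1, st.2 ++ [line])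
  else if st.2 ≠ [] then (st.1 ++ [st.2], [])
  else st

def format_poetry_py_alt (poem : String) : String :=
  let st := (PySem.Chars.splitOn poem.toList ['\n']).foldl pvBStep ([], [])
  let trailing := st.1 ≠ [] ∧ st.2 = []
  let stanzas := if st.2 ≠ [] then st.1 ++ [st.2] else st.1
  String.ofList (PySem.Chars.join ['\n', '\n'] (stanzas.map (PySem.Chars.join ['\n'])) ++
    (if trailing then ['\n'] else []))

-- ===== PRECONDITION & SPEC =====
def Spec_format_poetry_py (poem : String) (out : String) : Prop := out = format_poetry_py_alt poem
instance (poem : String) (out : String) : Decidable (Spec_format_poetry_py poem out) := by unfold Spec_format_poetry_py; infer_instance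

-- ===== CLAIM (what is proved, stated in full; the proofs are below) =====
def Claim_equal_format_poetry_py : Prop := ∀ (poem : String), Dom_format_poetry_py poem → Spec_format_poetry_py poem (format_poetry_py poem)

-- ===== LEMMAS AND PROOFS =====

-- A's flat list, expressed from B's state: stanzas and current stanza glued with blank lines.
def pvGlue (st : List (List (List Char)) × List (List Char)) : List (List Char) :=
  List.intercalate [[]] (st.1 ++ [st.2])

-- Invariant on B's state: every finished stanza is nonempty, and every line stored anywhere is nonempty.
def pvGood (st : List (List (List Char)) × List (List Char)) : Prop :=
  (∀ s ∈ st.1, s ≠ [] ∧ ∀ l ∈ s, l ≠ []) ∧ (∀ l ∈ st.2, l ≠ [])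

theorem pv_ic_cons_cons {α : Type} (sep a b : List α) (t : List (List α)) :
    List.intercalate sep (a :: b :: t) = a ++ sep ++ List.intercalate sep (b :: t) := by
  simp [List.intercalate]

theorem pv_ic_singleton {α : Type} (sep a : List α) : List.intercalate sep [a] = a := by
  simp [List.intercalate]

theorem pv_ic_append {α : Type} (sep : List α) (A B : List (List α)) (hA : A ≠ []) (hB : B ≠ []) :
    List.intercalate sep (A ++ B) = List.intercalate sep A ++ sep ++ List.intercalate sep B := by
  induction A with
  | nil => exact absurd rfl hA
  | cons a t ih =>
    cases t with
    | nil =>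
      cases B with
      | nil => exact absurd rfl hB
      | cons b tb => simp [pv_ic_cons_cons, pv_ic_singleton]
    | cons a' t' =>
      have e : (a :: a' :: t') ++ B = a :: ((a' :: t') ++ B) := rfl
      have e2 : (a' :: t') ++ B = a' :: (t' ++ B) := rfl
      rw [e, e2, pv_ic_cons_cons, ← e2, ih (by simp), pv_ic_cons_cons]
      simp

theorem pv_ic_snoc {α : Type} (sep : List α) (S : List (List α)) (c : List α) (hS : S ≠ []) :
    List.intercalate sep (S ++ [c]) = List.intercalate sep S ++ sep ++ c := by
  rw [pv_ic_append sep S [c] hS (by simp), pv_ic_singleton]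

theorem pv_ic_ne_nil {α : Type} (sep : List α) (S : List (List α)) (hS : S ≠ [])
    (hmem : ∀ s ∈ S, s ≠ []) : List.intercalate sep S ≠ [] := by
  cases S with
  | nil => exact absurd rfl hS
  | cons c t =>
    cases t with
    | nil =>
      rw [pv_ic_singleton]; exact hmem c (by simp)
    | cons c' t' =>
      rw [pv_ic_cons_cons]
      have hcne : c ≠ [] := hmem c (by simp)
      cases c with
      | nil => exact absurd rfl hcne
      | cons x xs => simp

theorem pv_glue_snoc (S : List (List (List Char))) (c : List (List Char)) (x : List Char) :
    pvGlue (S, c) ++ [x] = pvGlue (S, c ++ [x]) := by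
  rcases List.eq_nil_or_concat S with rfl | ⟨S', s, hSe⟩
  · simp [pvGlue, pv_ic_singleton]
  · rw [List.concat_eq_append] at hSe
    subst hSe
    show List.intercalate [[]] ((S' ++ [s]) ++ [c]) ++ [x] =
      List.intercalate [[]] ((S' ++ [s]) ++ [c ++ [x]])
    rw [pv_ic_snoc _ (S' ++ [s]) c (by simp), pv_ic_snoc _ (S' ++ [s]) (c ++ [x]) (by simp)]
    simp

theorem pv_glue_close (S : List (List (List Char))) (c : List (List Char)) :
    pvGlue (S, c) ++ [[]] = pvGlue (S ++ [c], []) := by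
  show List.intercalate [[]] (S ++ [c]) ++ [[]] =
    List.intercalate [[]] ((S ++ [c]) ++ [[]])
  rw [pv_ic_snoc _ (S ++ [c]) ([] : List (List Char)) (by simp)]
  simp

theorem pv_glue_last (S : List (List (List Char))) (c : List (List Char)) (x : List Char) :
    (pvGlue (S, c ++ [x])).getLastD [] = x := by
  rcases List.eq_nil_or_concat S with rfl | ⟨S', s, hSe⟩
  · simp [pvGlue, pv_ic_singleton]
  · rw [List.concat_eq_append] at hSe
    subst hSe
    show (List.intercalate [[]] ((S' ++ [s]) ++ [c ++ [x]])).getLastD [] = x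
    rw [pv_ic_snoc _ (S' ++ [s]) (c ++ [x]) (by simp),
      show List.intercalate [[]] (S' ++ [s]) ++ [[]] ++ (c ++ [x]) =
        (List.intercalate [[]] (S' ++ [s]) ++ [[]] ++ c) ++ [x] by simp]
    exact List.getLastD_concat

-- one step of A, applied to the glued state, is the glueing of one step of B
theorem pv_step (st : List (List (List Char)) × List (List Char)) (raw : List Char)
    (h : pvGood st) : pvAStep (pvGlue st) raw = pvGlue (pvBStep st raw) ∧ pvGood (pvBStep st raw) := by
  obtain ⟨S, c⟩ := st
  obtain ⟨hS, hc⟩ := h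
  simp only at hS hc
  by_cases hl : PySem.Chars.strip raw = []
  · by_cases hcne : c = []
    · -- blank line, empty current stanza: both sides unchanged
      subst hcne
      have hB : pvBStep (S, ([] : List (List Char))) raw = (S, []) := by
        simp [pvBStep, hl]
      have hA : pvAStep (pvGlue (S, [])) raw = pvGlue (S, []) := by
        rcases List.eq_nil_or_concat S with rfl | ⟨S', s, hSe⟩
        · simp [pvAStep, hl, pvGlue, pv_ic_singleton]
        · rw [List.concat_eq_append] at hSe
          subst hSe
          have hg : pvGlue (S' ++ [s], ([] : List (List Char))) =
              List.intercalate [[]] (S' ++ [s]) ++ [[]] := by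
            show List.intercalate [[]] ((S' ++ [s]) ++ [[]]) = _
            rw [pv_ic_snoc _ (S' ++ [s]) ([] : List (List Char)) (by simp)]
            simp
          have hlast : (pvGlue (S' ++ [s], ([] : List (List Char)))).getLastD [] = [] := by
            rw [hg]; exact List.getLastD_concat
          simp only [pvAStep, hl, if_neg (by simp : ¬(([] : List Char) ≠ []))]
          rw [if_neg]
          rintro ⟨-, h2⟩
          exact h2 hlast
      exact ⟨by rw [hA, hB], by rw [hB]; exact ⟨hS, hc⟩⟩
    · -- blank line closing a nonempty current stanza
      obtain ⟨c', x, hce⟩ := (List.eq_nil_or_concat c).resolve_left hcne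
      rw [List.concat_eq_append] at hce
      subst hce
      have hx : x ≠ [] := hc x (by simp)
      have hlast : (pvGlue (S, c' ++ [x])).getLastD [] ≠ [] := by
        rw [pv_glue_last]; exact hx
      have hgne : pvGlue (S, c' ++ [x]) ≠ [] := by
        intro h0; rw [h0] at hlast; simp at hlast
      have hA : pvAStep (pvGlue (S, c' ++ [x])) raw = pvGlue (S, c' ++ [x]) ++ [[]] := by
        simp only [pvAStep, hl, if_neg (by simp : ¬(([] : List Char) ≠ []))]
        rw [if_pos ⟨hgne, hlast⟩]
      have hB : pvBStep (S, c' ++ [x]) raw = (S ++ [c' ++ [x]], []) := by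
        simp [pvBStep, hl]
      refine ⟨by rw [hA, hB, pv_glue_close], ?_⟩
      rw [hB]
      refine ⟨?_, by simp⟩
      intro s hs
      rcases List.mem_append.mp hs with h' | h'
      · exact hS s h'
      · have : s = c' ++ [x] := by simpa using h'
        subst this
        exact ⟨by simp, hc⟩
  · -- nonblank line: appended to the current stanza on both sides
    have hA : pvAStep (pvGlue (S, c)) raw = pvGlue (S, c) ++ [PySem.Chars.strip raw] := by
      simp [pvAStep, hl]
    have hB : pvBStep (S, c) raw = (S, c ++ [PySem.Chars.strip raw]) := by
      simp [pvBStep, hl]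
    refine ⟨by rw [hA, hB, pv_glue_snoc], ?_⟩
    rw [hB]
    refine ⟨hS, ?_⟩
    intro l hlmem
    rcases List.mem_append.mp hlmem with h' | h'
    · exact hc l h'
    · have : l = PySem.Chars.strip raw := by simpa using h'
      subst this
      exact hl

theorem pv_fold (ls : List (List Char)) (st : List (List (List Char)) × List (List Char))
    (h : pvGood st) :
    ls.foldl pvAStep (pvGlue st) = pvGlue (ls.foldl pvBStep st) ∧ pvGood (ls.foldl pvBStep st) := by
  induction ls generalizing st with
  | nil => exact ⟨rfl, h⟩
  | cons raw rest ih =>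
    obtain ⟨h1, h2⟩ := pv_step st raw h
    simpa [List.foldl_cons, h1] using ih (pvBStep st raw) h2

-- joining the glued stanzas with '\n' = joining per-stanza '\n'-joins with '\n\n'
theorem pv_join_glue (L : List (List (List Char))) (hmem : ∀ s ∈ L, s ≠ []) :
    PySem.Chars.join ['\n'] (List.intercalate [[]] L) =
      PySem.Chars.join ['\n', '\n'] (L.map (PySem.Chars.join ['\n'])) := by
  induction L with
  | nil => simp [PySem.Chars.join, List.intercalate]
  | cons c t ih =>
    cases t with
    | nil => simp [pv_ic_singleton, PySem.Chars.join]
    | cons c' t' =>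
      have hc : c ≠ [] := hmem c (by simp)
      have htmem : ∀ s ∈ c' :: t', s ≠ [] := fun s hs => hmem s (by simp [hs])
      have hic : List.intercalate ([[]] : List (List Char)) (c' :: t') ≠ [] :=
        pv_ic_ne_nil _ _ (by simp) htmem
      obtain ⟨q, rest, hq⟩ : ∃ q rest,
          List.intercalate ([[]] : List (List Char)) (c' :: t') = q :: rest := by
        cases hx : List.intercalate ([[]] : List (List Char)) (c' :: t') with
        | nil => exact absurd hx hic
        | cons q rest => exact ⟨q, rest, rfl⟩
      show List.intercalate ['\n'] (List.intercalate [[]] (c :: c' :: t')) = _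
      rw [pv_ic_cons_cons [[]] c c' t',
        show c ++ [[]] ++ List.intercalate [[]] (c' :: t') =
          c ++ (([] : List Char) :: List.intercalate [[]] (c' :: t')) by simp,
        pv_ic_append ['\n'] c (([] : List Char) :: List.intercalate [[]] (c' :: t')) hc (by simp),
        hq, pv_ic_cons_cons ['\n'] [] q rest, ← hq]
      have ihr := ih htmem
      rw [show (PySem.Chars.join ['\n'] (List.intercalate [[]] (c' :: t')) : List Char) =
        List.intercalate ['\n'] (List.intercalate [[]] (c' :: t')) from rfl] at ihr
      rw [ihr]
      show _ = List.intercalate ['\n', '\n']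
        (PySem.Chars.join ['\n'] c :: (c' :: t').map (PySem.Chars.join ['\n']))
      rw [show ((c' :: t').map (PySem.Chars.join ['\n'])) =
          PySem.Chars.join ['\n'] c' :: t'.map (PySem.Chars.join ['\n']) from rfl,
        pv_ic_cons_cons]
      simp [PySem.Chars.join]

-- ===== VERDICT (by name: the statement is the Claim_ definition above) =====
theorem format_poetry_py_spec : Claim_equal_format_poetry_py := by
  intro poem _
  show format_poetry_py poem = format_poetry_py_alt poem
  unfold format_poetry_py format_poetry_py_alt
  obtain ⟨h1, h2⟩ := pv_fold (PySem.Chars.splitOn poem.toList ['\n']) ([], []) (by simp [pvGood])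
  rw [show pvGlue ([], []) = ([] : List (List Char)) by simp [pvGlue, pv_ic_singleton]] at h1
  show String.ofList (PySem.Chars.join ['\n']
      (List.foldl pvAStep [] (PySem.Chars.splitOn poem.toList ['\n']))) = _
  rw [h1]
  generalize hst : List.foldl pvBStep ([], []) (PySem.Chars.splitOn poem.toList ['\n']) = st
  rw [hst] at h2
  obtain ⟨S, c⟩ := st
  obtain ⟨hS, hc⟩ := h2
  simp only at hS hc
  show String.ofList (PySem.Chars.join ['\n'] (pvGlue (S, c))) =
    String.ofList (PySem.Chars.join ['\n', '\n']
        ((if c ≠ [] then S ++ [c] else S).map (PySem.Chars.join ['\n'])) ++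
      (if S ≠ [] ∧ c = [] then ['\n'] else []))
  congr 1
  by_cases hcne : c = []
  · subst hcne
    by_cases hSne : S = []
    · subst hSne
      simp [pvGlue, PySem.Chars.join, List.intercalate]
    · -- poem ended in blanks after content: trailing newline
      rw [if_neg (show ¬(([] : List (List Char)) ≠ []) by simp),
        if_pos (⟨hSne, rfl⟩ : S ≠ [] ∧ ([] : List (List Char)) = [])]
      have hicS : List.intercalate ([[]] : List (List Char)) S ≠ [] :=
        pv_ic_ne_nil _ _ hSne (fun s hs => (hS s hs).1)
      have hgS : pvGlue (S, ([] : List (List Char))) = List.intercalate [[]] S ++ [[]] := by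
        show List.intercalate [[]] (S ++ [[]]) = _
        rw [pv_ic_snoc _ S ([] : List (List Char)) hSne]
        simp
      rw [hgS]
      show List.intercalate ['\n'] (List.intercalate [[]] S ++ [[]]) = _
      rw [pv_ic_snoc ['\n'] _ _ hicS]
      rw [show List.intercalate ['\n'] (List.intercalate [[]] S) =
        PySem.Chars.join ['\n'] (List.intercalate [[]] S) from rfl]
      rw [pv_join_glue S (fun s hs => (hS s hs).1)]
      simp
  · -- current stanza nonempty: no trailing newline, last stanza is c
    rw [if_pos hcne, if_neg (show ¬(S ≠ [] ∧ c = []) from fun h => hcne h.2)]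
    rw [show pvGlue (S, c) = List.intercalate [[]] (S ++ [c]) from rfl]
    rw [show PySem.Chars.join ['\n'] (List.intercalate [[]] (S ++ [c])) =
      PySem.Chars.join ['\n'] (List.intercalate [[]] (S ++ [c])) from rfl]
    rw [pv_join_glue (S ++ [c]) (by
      intro s hs
      rcases List.mem_append.mp hs with h' | h'
      · exact (hS s h').1
      · have : s = c := by simpa using h'
        subst this; exact hcne)]
    simp
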